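-- pv_equiv track=rewrite | github.com/PentaChess413/BlenderAddons | LMMDLImport_New/mdl.py | calc_img_size
-- ===== SOURCE A (Python) =====
-- def calc_img_size(fmt, w, h):
--     # Custom MK Wiki has decent documentation on the texture formats, so check there if you're interested!
--     # Just so you know, the first zeroes are there because I need to pad out the list
--     bpp = [4, 8, 8, 16, 16, 16, 32, 0, 4, 8, 16, 0, 0, 0, 4]
--     tile_size_w = [8, 8, 8, 4, 4, 4, 4, 0, 8, 8, 4, 0, 0, 0, 8]
--     tile_size_h = [8, 4, 4, 4, 4, 4, 4, 0, 8, 4, 4, 0, 0, 0, 8]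
--     while w % tile_size_w[int(fmt)] != 0:
--         w += 1
--     while h % tile_size_h[int(fmt)] != 0:
--         h += 1
--     return (w * h * bpp[int(fmt)]) // 8
-- ===== SOURCE B (Python) =====
-- def _align(x, t):
--     # distance to the next multiple of t is (-x) % t (t > 0)
--     return x + (-x) % t
--
-- _SPECS = {0: (4, 8, 8), 1: (8, 8, 4), 2: (8, 8, 4), 3: (16, 4, 4),
--           4: (16, 4, 4), 5: (16, 4, 4), 6: (32, 4, 4), 8: (4, 8, 8),
--           9: (8, 8, 4), 10: (16, 4, 4), 14: (4, 8, 8)}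
--
-- def calc_img_size(fmt, w, h):
--     bpp, tw, th = _SPECS[int(fmt) % 15]
--     return _align(w, tw) * _align(h, th) * bpp // 8
-- ===== Notes on version B (the rewrite author's own statement) =====
-- stated objective: simpler
-- what changed: Replaces the three parallel per-format lists and the two increment-until-aligned while loops with a single dict mapping fmt % 15 to (bpp, tile_w, tile_h) and a closed-form alignment helper x + (-x) % t.
import Mathlib
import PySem

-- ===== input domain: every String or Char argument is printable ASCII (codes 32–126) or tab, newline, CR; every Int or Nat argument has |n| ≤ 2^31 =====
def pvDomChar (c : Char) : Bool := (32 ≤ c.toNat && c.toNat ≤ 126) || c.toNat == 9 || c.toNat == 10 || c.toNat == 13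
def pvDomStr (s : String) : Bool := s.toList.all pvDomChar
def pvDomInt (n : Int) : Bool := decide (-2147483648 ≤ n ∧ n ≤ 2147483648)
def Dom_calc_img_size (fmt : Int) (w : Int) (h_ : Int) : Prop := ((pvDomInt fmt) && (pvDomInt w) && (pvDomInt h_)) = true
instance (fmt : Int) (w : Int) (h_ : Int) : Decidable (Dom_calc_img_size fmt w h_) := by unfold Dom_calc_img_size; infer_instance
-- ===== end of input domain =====

-- B replaces the three parallel index lists and the two increment-until-aligned
-- while loops by a single per-format spec table (a dict keyed by fmt % 15) and a
-- closed-form alignment helper x + (-x) % t; objective: simpler.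

-- ===== PORT A =====
-- the while loop 'while w % t != 0: w += 1'; fuel t.toNat suffices since at
-- most t - 1 increments are needed when t > 0 (under Pre_ t is 4 or 8)
def pvPadLoop (t : Int) (w : Int) : Nat → Int
  | 0 => w
  | f + 1 => if PySem.Int.mod w t ≠ 0 then pvPadLoop t (w + 1) f else w

def calc_img_size (fmt : Int) (w : Int) (h_ : Int) : Int :=
  let bpp : List Int := [4, 8, 8, 16, 16, 16, 32, 0, 4, 8, 16, 0, 0, 0, 4]
  let tile_size_w : List Int := [8, 8, 8, 4, 4, 4, 4, 0, 8, 8, 4, 0, 0, 0, 8]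
  let tile_size_h : List Int := [8, 4, 4, 4, 4, 4, 4, 0, 8, 4, 4, 0, 0, 0, 8]
  let tw := (PySem.List.pyGet? tile_size_w fmt).getD 0   -- in range & nonzero under Pre_
  let th := (PySem.List.pyGet? tile_size_h fmt).getD 0
  let w' := pvPadLoop tw w tw.toNat
  let h' := pvPadLoop th h_ th.toNat
  PySem.Int.floordiv (w' * h' * (PySem.List.pyGet? bpp fmt).getD 0) 8

-- ===== PORT B =====
-- the module-level dict _SPECS: fmt % 15 ↦ (bpp, tile_w, tile_h)
def pvSpecs : PySem.Dict Int (Int × Int × Int) :=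
  PySem.Dict.ofList [(0, (4, 8, 8)), (1, (8, 8, 4)), (2, (8, 8, 4)), (3, (16, 4, 4)),
   (4, (16, 4, 4)), (5, (16, 4, 4)), (6, (32, 4, 4)), (8, (4, 8, 8)),
   (9, (8, 8, 4)), (10, (16, 4, 4)), (14, (4, 8, 8))]

def pvAlign (x t : Int) : Int := x + PySem.Int.mod (-x) t

def calc_img_size_alt (fmt : Int) (w : Int) (h_ : Int) : Int :=
  match PySem.Dict.get? pvSpecs (PySem.Int.mod fmt 15) with
  | none => 0   -- Python raises KeyError here; unreachable under Pre_
  | some (bpp, tw, th) => PySem.Int.floordiv (pvAlign w tw * pvAlign h_ th * bpp) 8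

-- ===== PRECONDITION & SPEC =====
-- Pre_ excludes exactly the inputs where Python A raises: fmt outside the list's
-- index range -15..14 (IndexError) and the padding formats 7, 11, 12, 13 whose
-- tile size is 0 (ZeroDivisionError in 'w % 0').
def Pre_calc_img_size (fmt : Int) (w : Int) (h_ : Int) : Prop :=
  -15 ≤ fmt ∧ fmt ≤ 14 ∧ fmt % 15 ≠ 7 ∧ fmt % 15 ≠ 11 ∧ fmt % 15 ≠ 12 ∧ fmt % 15 ≠ 13
instance (fmt : Int) (w : Int) (h_ : Int) : Decidable (Pre_calc_img_size fmt w h_) := by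
  unfold Pre_calc_img_size; infer_instance

def pvWitness_calc_img_size : Int × Int × Int := (0, 13, 5)

def Spec_calc_img_size (fmt : Int) (w : Int) (h_ : Int) (out : Int) : Prop := out = calc_img_size_alt fmt w h_
instance (fmt : Int) (w : Int) (h_ : Int) (out : Int) : Decidable (Spec_calc_img_size fmt w h_ out) := by unfold Spec_calc_img_size; infer_instance

-- ===== CLAIM (what is proved, stated in full; the proofs are below) =====
def Claim_equal_calc_img_size : Prop := ∀ (fmt : Int) (w : Int) (h_ : Int), Dom_calc_img_size fmt w h_ → Pre_calc_img_size fmt w h_ → Spec_calc_img_size fmt w h_ (calc_img_size fmt w h_)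

-- ===== LEMMAS AND PROOFS =====

-- the while loop rounds up to the next multiple of 4 / of 8
lemma pvPad4 (w : Int) : pvPadLoop 4 w 4 = pvAlign w 4 := by
  simp only [pvAlign, pvPadLoop,
    PySem.Int.mod_eq_emod_of_pos (by norm_num : (0:Int) < 4)]
  split_ifs <;> omega

lemma pvPad8 (w : Int) : pvPadLoop 8 w 8 = pvAlign w 8 := by
  simp only [pvAlign, pvPadLoop,
    PySem.Int.mod_eq_emod_of_pos (by norm_num : (0:Int) < 8)]
  split_ifs <;> omega

-- ===== VERDICT (by name: the statement is the Claim_ definition above) =====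
theorem calc_img_size_spec : Claim_equal_calc_img_size := by
  intro fmt w h_ _ hpre
  obtain ⟨h1, h2, h3, h4, h5, h6⟩ := hpre
  show calc_img_size fmt w h_ = calc_img_size_alt fmt w h_
  interval_cases fmt <;>
    simp_all [calc_img_size, calc_img_size_alt, pvSpecs, PySem.Dict.get?, PySem.Dict.ofList, PySem.Dict.update, PySem.Dict.empty, PySem.Dict.insert, PySem.Dict.items, List.find?,
      PySem.List.pyGet?, PySem.List.pyIdx?, PySem.Int.mod, pvPad4, pvPad8]
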